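-- pv_equiv track=rewrite | github.com/micr0cuts/challenges | advent-of-code-2023/11.py | solve
-- ===== SOURCE A (Python) =====
-- def make_int_board(space: list[str]) -> list[list[int]]:
--     new_board = []
--     for row in space:
--         new_row = []
--         for char in row:
--             new_row.append(1 if char == '#' else 0)
--         new_board.append(new_row)
--     return new_board
--
-- def find_galaxies(space) -> list[tuple[int, int]]:
--     coords = []
--     for x, row in enumerate(space):
--         for y, col in enumerate(row):
--             if col == 1:
--                 coords.append((x, y))
--     return coords
--
-- def get_empties(spaces: list[list[int]]) -> list[list[int]]:
--     empties: list[list[int]] = [[], []]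
--     for i, row in enumerate(spaces):
--         if sum(row) == 0:
--             empties[0].append(i)
--     transpose = list(map(list, zip(*spaces)))
--     for i, col in enumerate(transpose):
--         if sum(col) == 0:
--             empties[1].append(i)
--     return empties
--
-- def add_expanded_space(
--                        first: tuple[int, int],
--                        second: tuple[int, int],
--                        empties: list[list[int]],
--                        how_many_extra: int = 1
-- ) -> int:
--     stride = -1 if first[0] > second[0] else 1
--     vertical_range = range(first[0], second[0], stride)
--     stride = -1 if first[1] > second[1] else 1
--     horizontal_range = range(first[1], second[1], stride)
--     empties_hit = sum(how_many_extra for i in empties[0] if i in vertical_range)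
--     empties_hit += sum(how_many_extra for i in empties[1] if i in horizontal_range)
--     return empties_hit
--
-- def solve(input_list: list[str], how_many_extra: int = 1) -> int:
--     answer = 0
--     int_board = make_int_board(input_list)
--     empties = get_empties(int_board)
--     galaxies_coords = find_galaxies(int_board)
--     for i, _ in enumerate((galaxies_coords)):
--         for j in range(i+1, len(galaxies_coords)):
--             first = galaxies_coords[i]
--             second = galaxies_coords[j]
--             added_distance = add_expanded_space(first, second, empties, how_many_extra)
--             vertical_distance = abs(second[0] - first[0])
--             horizontal_distance = abs(second[1] - first[1])
--             answer += vertical_distance + horizontal_distance + added_distance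
--     return answer
-- ===== SOURCE B (Python) =====
-- def solve(input_list: list[str], how_many_extra: int = 1) -> int:
--     # Per-axis: expand each coordinate by the number of empty rows/cols before
--     # it, then sum pairwise differences of the (axis-sorted) coordinates with a
--     # single prefix-sum pass instead of scanning the empties for every pair.
--     min_len = min((len(row) for row in input_list), default=0)
--     empty_rows = [i for i, row in enumerate(input_list) if '#' not in row]
--     empty_cols = [j for j in range(min_len)
--                   if all(row[j] != '#' for row in input_list)]
--
--     xs = []
--     raw_ys = []
--     for x, row in enumerate(input_list):
--         for y, ch in enumerate(row):
--             if ch == '#':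
--                 xs.append(x)
--                 raw_ys.append(y)
--     raw_ys.sort()  # xs is already non-decreasing (row-major scan)
--
--     def axis_total(vals, empties):
--         total = 0
--         prefix = 0
--         for k, v in enumerate(vals):
--             w = v + how_many_extra * sum(1 for e in empties if e < v)
--             total += k * w - prefix
--             prefix += w
--         return total
--
--     return axis_total(xs, empty_rows) + axis_total(raw_ys, empty_cols)
-- ===== Notes on version B (the rewrite author's own statement) =====
-- stated objective: faster
-- what changed: Replaces A's O(G^2) pair loop with per-pair scans over the empty-row/column lists by a per-axis computation: each galaxy coordinate is expanded once by the count of empty lines before it, and the per-axis sum of pairwise distances is obtained in a single prefix-sum sweep over the axis-sorted coordinates.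
import Mathlib
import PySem

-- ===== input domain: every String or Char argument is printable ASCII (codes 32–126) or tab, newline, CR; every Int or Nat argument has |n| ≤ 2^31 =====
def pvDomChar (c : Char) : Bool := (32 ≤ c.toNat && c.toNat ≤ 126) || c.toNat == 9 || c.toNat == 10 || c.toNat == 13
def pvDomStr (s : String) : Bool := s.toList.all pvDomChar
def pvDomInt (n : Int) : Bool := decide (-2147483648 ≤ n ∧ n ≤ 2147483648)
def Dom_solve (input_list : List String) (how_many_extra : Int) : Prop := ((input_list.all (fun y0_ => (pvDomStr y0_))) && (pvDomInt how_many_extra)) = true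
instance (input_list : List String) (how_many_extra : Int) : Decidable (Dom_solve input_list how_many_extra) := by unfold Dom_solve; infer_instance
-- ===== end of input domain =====

-- B replaces A's per-pair scans of the empty-row/column lists by a per-axis pass:
-- expanded coordinates plus a single prefix-sum sweep over the (axis-sorted)
-- galaxy coordinates (objective: faster).

-- ===== PORT A =====
def make_int_board (space : List String) : List (List Int) :=
  space.map (fun row => row.toList.map (fun ch => if ch = '#' then (1 : Int) else 0))

def find_galaxies (space : List (List Int)) : List (Int × Int) :=
  (PySem.List.enumerate space).foldl (fun coords xr =>
    (PySem.List.enumerate xr.2).foldl (fun cs yc =>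
      if yc.2 = 1 then cs ++ [(xr.1, yc.1)] else cs) coords) []

-- shortest row length (Python's zip(*rows) truncates to it); 0 for no rows
def pvMinLen {α : Type} (rows : List (List α)) : Nat :=
  match rows with
  | [] => 0
  | r :: rs => rs.foldl (fun m row => min m row.length) r.length

-- exact rendering of list(map(list, zip(*rows))): column j, for j below every
-- row's length, so the pyGetD default 0 is never used
def pyZipT (rows : List (List Int)) : List (List Int) :=
  (PySem.List.pyRange 0 (pvMinLen rows : Int) 1).map
    (fun j => rows.map (fun r => PySem.List.pyGetD r j 0))

def get_empties (spaces : List (List Int)) : List Int × List Int :=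
  ((PySem.List.enumerate spaces).foldl
      (fun acc ir => if ir.2.sum = 0 then acc ++ [ir.1] else acc) [],
   (PySem.List.enumerate (pyZipT spaces)).foldl
      (fun acc ic => if ic.2.sum = 0 then acc ++ [ic.1] else acc) [])

def add_expanded_space (first second : Int × Int) (empties : List Int × List Int)
    (how_many_extra : Int) : Int :=
  let stride1 : Int := if first.1 > second.1 then -1 else 1
  let vertical_range := PySem.List.pyRange first.1 second.1 stride1
  let stride2 : Int := if first.2 > second.2 then -1 else 1
  let horizontal_range := PySem.List.pyRange first.2 second.2 stride2
  let empties_hit :=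
    ((empties.1.filter (fun i => i ∈ vertical_range)).map (fun _ => how_many_extra)).sum
  empties_hit +
    ((empties.2.filter (fun i => i ∈ horizontal_range)).map (fun _ => how_many_extra)).sum

def solve (input_list : List String) (how_many_extra : Int) : Int :=
  let int_board := make_int_board input_list
  let empties := get_empties int_board
  let g := find_galaxies int_board
  -- g[i]/g[j]: indices are always in range, so the pyGetD default (0,0) is never used
  (PySem.List.enumerate g).foldl (fun answer iu =>
    (PySem.List.pyRange (iu.1 + 1) (g.length : Int) 1).foldl (fun ans j =>
      let first := PySem.List.pyGetD g iu.1 ((0 : Int), (0 : Int))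
      let second := PySem.List.pyGetD g j ((0 : Int), (0 : Int))
      let added_distance := add_expanded_space first second empties how_many_extra
      let vertical_distance := |second.1 - first.1|
      let horizontal_distance := |second.2 - first.2|
      ans + vertical_distance + horizontal_distance + added_distance) answer) 0

-- ===== PORT B =====
-- w = v + extra * sum(1 for e in empties if e < v); k,total,prefix as in Source B
def axis_total (vals : List Int) (empties : List Int) (how_many_extra : Int) : Int :=
  ((PySem.List.enumerate vals).foldl (fun st kv =>
      let w := kv.2 + how_many_extra *
        ((empties.filter (fun e => e < kv.2)).map (fun _ => (1 : Int))).sum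
      (st.1 + kv.1 * w - st.2, st.2 + w)) ((0 : Int), (0 : Int))).1

def solve_alt (input_list : List String) (how_many_extra : Int) : Int :=
  let rows := input_list.map (fun s => s.toList)
  let min_len := pvMinLen rows   -- min((len(row) for row in input_list), default=0)
  let empty_rows : List Int := (PySem.List.enumerate rows).foldl
    (fun acc ir => if '#' ∈ ir.2 then acc else acc ++ [ir.1]) []
  -- row[j] for j < min_len is always in range, so the pyGetD default ' ' is never used
  let empty_cols : List Int := (PySem.List.pyRange 0 (min_len : Int) 1).foldl
    (fun acc j => if rows.all (fun row => PySem.List.pyGetD row j ' ' ≠ '#')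
                  then acc ++ [j] else acc) []
  let st := (PySem.List.enumerate rows).foldl (fun st xr =>
      (PySem.List.enumerate xr.2).foldl (fun st ych =>
        if ych.2 = '#' then (st.1 ++ [xr.1], st.2 ++ [ych.1]) else st) st)
    (([] : List Int), ([] : List Int))
  let ys := PySem.List.sorted st.2 (fun v => v) false   -- raw_ys.sort()
  axis_total st.1 empty_rows how_many_extra + axis_total ys empty_cols how_many_extra

-- ===== PRECONDITION & SPEC =====
def Spec_solve (input_list : List String) (how_many_extra : Int) (out : Int) : Prop := out = solve_alt input_list how_many_extra
instance (input_list : List String) (how_many_extra : Int) (out : Int) : Decidable (Spec_solve input_list how_many_extra out) := by unfold Spec_solve; infer_instance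

-- ===== CLAIM (what is proved, stated in full; the proofs are below) =====
def Claim_equal_solve : Prop := ∀ (input_list : List String) (how_many_extra : Int), Dom_solve input_list how_many_extra → Spec_solve input_list how_many_extra (solve input_list how_many_extra)

-- ===== LEMMAS AND PROOFS =====

-- sum over all ordered pairs (earlier, later) of a list
def pairSum {α : Type} (f : α → α → Int) : List α → Int
  | [] => 0
  | a :: l => (l.map (f a)).sum + pairSum f l

theorem pairSum_append_singleton {α : Type} (f : α → α → Int) (l : List α) (a : α) :
    pairSum f (l ++ [a]) = pairSum f l + (l.map (fun x => f x a)).sum := by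
  induction l with
  | nil => simp [pairSum]
  | cons b t ih => simp [pairSum, ih]; ring

theorem pairSum_congr {α : Type} {R : α → α → Prop} {f g : α → α → Int} {l : List α}
    (h : l.Pairwise R) (hfg : ∀ a b, R a b → f a b = g a b) :
    pairSum f l = pairSum g l := by
  induction l with
  | nil => rfl
  | cons a t ih =>
    rcases List.pairwise_cons.mp h with ⟨ha, ht⟩
    simp only [pairSum, ih ht]
    congr 1
    exact congrArg _ (List.map_congr_left (fun b hb => hfg a b (ha b hb)))

theorem pairSum_add {α : Type} (f g : α → α → Int) (l : List α) :
    pairSum (fun a b => f a b + g a b) l = pairSum f l + pairSum g l := by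
  induction l with
  | nil => rfl
  | cons a t ih =>
    simp only [pairSum, ih]
    have : ((t.map (fun b => f a b + g a b)).sum) = (t.map (f a)).sum + (t.map (g a)).sum := by
      induction t with
      | nil => simp
      | cons c u ihu => simp at ihu ⊢; omega
    omega

theorem pairSum_map {α β : Type} (f : β → β → Int) (h : α → β) (l : List α) :
    pairSum f (l.map h) = pairSum (fun a b => f (h a) (h b)) l := by
  induction l with
  | nil => rfl
  | cons a t ih =>
    simp only [List.map_cons, pairSum, ih, List.map_map]
    rfl

theorem pairSum_perm {α : Type} {f : α → α → Int} (hs : ∀ a b, f a b = f b a)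
    {l l' : List α} (hp : l.Perm l') : pairSum f l = pairSum f l' := by
  induction hp with
  | nil => rfl
  | cons x hp ih => simp [pairSum, ih, (hp.map _).sum_eq]
  | swap x y l => simp [pairSum, hs x y]; ring
  | trans _ _ ih1 ih2 => omega


-- 0/1 value of a board cell
def pvInd (ch : Char) : Int := if ch = '#' then 1 else 0

def pvRows (input_list : List String) : List (List Char) :=
  input_list.map (fun s => s.toList)

-- the empty-row / empty-column index lists (common value of both ports)
def pvER (rows : List (List Char)) : List Int :=
  ((PySem.List.enumerate rows).filter (fun ir => decide (¬ '#' ∈ ir.2))).map (·.1)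

def pvEC (rows : List (List Char)) : List Int :=
  (PySem.List.pyRange 0 (pvMinLen rows : Int) 1).filter
    (fun j => rows.all (fun row => PySem.List.pyGetD row j ' ' ≠ '#'))

def pvCnt (E : List Int) (v : Int) : Int := (E.countP (fun e => decide (e < v)) : Int)

def pvF (E : List Int) (extra v : Int) : Int := v + extra * pvCnt E v

-- galaxy coordinates, row-major, scanned from a char board starting at row s
def galRowC (x : Int) (row : List Char) : List (Int × Int) :=
  ((PySem.List.enumerate row).filter (fun yc => decide (yc.2 = '#'))).map (fun yc => (x, yc.1))

def galC : Int → List (List Char) → List (Int × Int)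
  | _, [] => []
  | s, r :: rs => galRowC s r ++ galC (s + 1) rs

-- the per-pair quantity A adds for a pair of galaxies
def pvC (empties : List Int × List Int) (extra : Int) (p q : Int × Int) : Int :=
  |q.1 - p.1| + |q.2 - p.2| + add_expanded_space p q empties extra

theorem enumerate_map {α β : Type} (h : α → β) (l : List α) :
    ∀ s : Int, PySem.List.enumerate (l.map h) s
      = (PySem.List.enumerate l s).map (fun p => (p.1, h p.2)) := by
  induction l with
  | nil => intro s; simp [PySem.List.enumerate_nil]
  | cons a t ih => intro s; simp [PySem.List.enumerate_cons, ih]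

theorem enumerate_pyRange_zero (n : Nat) :
    PySem.List.enumerate (PySem.List.pyRange 0 (n : Int) 1) 0
      = (PySem.List.pyRange 0 (n : Int) 1).map (fun j => (j, j)) := by
  induction n with
  | zero => simp [PySem.List.enumerate_nil]
  | succ m ih =>
    have h1 : ((m : Int) + 1) = ((m + 1 : Nat) : Int) := by push_cast; ring
    rw [← h1, PySem.List.pyRange_one_succ_right (by positivity),
        PySem.List.enumerate_append, List.map_append, ih]
    simp [PySem.List.length_pyRange_one, PySem.List.enumerate_cons, PySem.List.enumerate_nil]

theorem make_int_board_eq (input_list : List String) :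
    make_int_board input_list = (pvRows input_list).map (fun row => row.map pvInd) := by
  simp [make_int_board, pvRows, pvInd, List.map_map]

theorem foldA_inner (x : Int) (row : List Char) (coords : List (Int × Int)) :
    (PySem.List.enumerate (row.map pvInd) 0).foldl
      (fun cs yc => if yc.2 = 1 then cs ++ [(x, yc.1)] else cs) coords
    = coords ++ galRowC x row := by
  rw [enumerate_map, List.foldl_map]
  have hfn : (fun (cs : List (Int × Int)) (p : Int × Char) =>
        if ((p.1, pvInd p.2) : Int × Int).2 = 1 then cs ++ [(x, ((p.1, pvInd p.2) : Int × Int).1)] else cs)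
      = (fun cs p => if p.2 = '#' then cs ++ [(x, p.1)] else cs) := by
    funext cs p; by_cases h : p.2 = '#' <;> simp [pvInd, h]
  rw [hfn, PySem.List.foldl_append_ite (p := fun (p : Int × Char) => p.2 = '#')
    (f := fun p => (x, p.1))]
  rfl

theorem foldA_outer (rs : List (List Char)) :
    ∀ (s : Int) (acc : List (Int × Int)),
    (PySem.List.enumerate (rs.map (fun r => r.map pvInd)) s).foldl
      (fun coords xr => (PySem.List.enumerate xr.2).foldl
        (fun cs yc => if yc.2 = 1 then cs ++ [(xr.1, yc.1)] else cs) coords) acc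
    = acc ++ galC s rs := by
  induction rs with
  | nil => intro s acc; simp [PySem.List.enumerate_nil, galC]
  | cons r t ih =>
    intro s acc
    simp only [List.map_cons, PySem.List.enumerate_cons, List.foldl_cons]
    rw [foldA_inner s r acc, ih (s + 1), galC, List.append_assoc]

-- find_galaxies of the int board is galC of the char rows
theorem find_galaxies_eq (input_list : List String) :
    find_galaxies (make_int_board input_list) = galC 0 (pvRows input_list) := by
  rw [find_galaxies, make_int_board_eq]
  simpa using foldA_outer (pvRows input_list) 0 []

theorem foldB_inner (x : Int) (l : List (Int × Char)) :
    ∀ st : List Int × List Int,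
    l.foldl (fun st ych => if ych.2 = '#' then (st.1 ++ [x], st.2 ++ [ych.1]) else st) st
    = (st.1 ++ (l.filter (fun yc => decide (yc.2 = '#'))).map (fun _ => x),
       st.2 ++ (l.filter (fun yc => decide (yc.2 = '#'))).map (·.1)) := by
  induction l with
  | nil => intro st; simp
  | cons p t ih =>
    intro st
    by_cases h : p.2 = '#' <;> simp [h, ih]

theorem galRowC_proj (x : Int) (row : List Char) :
    (galRowC x row).map (·.1)
        = ((PySem.List.enumerate row).filter (fun yc => decide (yc.2 = '#'))).map (fun _ => x)
    ∧ (galRowC x row).map (·.2)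
        = ((PySem.List.enumerate row).filter (fun yc => decide (yc.2 = '#'))).map (·.1) := by
  constructor <;> (simp only [galRowC, List.map_map]; rfl)

theorem foldB_outer (rs : List (List Char)) :
    ∀ (s : Int) (st : List Int × List Int),
    (PySem.List.enumerate rs s).foldl (fun st xr =>
      (PySem.List.enumerate xr.2).foldl (fun st ych =>
        if ych.2 = '#' then (st.1 ++ [xr.1], st.2 ++ [ych.1]) else st) st) st
    = (st.1 ++ (galC s rs).map (·.1), st.2 ++ (galC s rs).map (·.2)) := by
  induction rs with
  | nil => intro s st; simp [PySem.List.enumerate_nil, galC]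
  | cons r t ih =>
    intro s st
    simp only [PySem.List.enumerate_cons, List.foldl_cons]
    rw [foldB_inner s (PySem.List.enumerate r) st, ih (s + 1)]
    simp [galC, (galRowC_proj s r).1, (galRowC_proj s r).2, List.append_assoc]

-- B's galaxy scan produces the two projections of galC
theorem b_scan_eq (rows : List (List Char)) :
    ((PySem.List.enumerate rows).foldl (fun st xr =>
        (PySem.List.enumerate xr.2).foldl (fun st ych =>
          if ych.2 = '#' then (st.1 ++ [xr.1], st.2 ++ [ych.1]) else st) st)
      (([] : List Int), ([] : List Int)))
    = ((galC 0 rows).map (·.1), (galC 0 rows).map (·.2)) := by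
  simpa using foldB_outer rows 0 ([], [])

theorem galRowC_fst (x : Int) (row : List Char) : ∀ p ∈ galRowC x row, p.1 = x := by
  intro p hp
  rcases List.mem_map.mp hp with ⟨yc, _, rfl⟩
  rfl

theorem galC_fst_ge (rs : List (List Char)) : ∀ s : Int, ∀ p ∈ galC s rs, s ≤ p.1 := by
  induction rs with
  | nil => intro s p hp; simp [galC] at hp
  | cons r t ih =>
    intro s p hp
    rcases List.mem_append.mp hp with h | h
    · exact le_of_eq (galRowC_fst s r p h).symm
    · linarith [ih (s + 1) p h]

theorem galC_pairwise (rs : List (List Char)) : ∀ s : Int,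
    (galC s rs).Pairwise (fun p q => p.1 ≤ q.1) := by
  induction rs with
  | nil => intro s; simp [galC]
  | cons r t ih =>
    intro s
    rw [galC, List.pairwise_append]
    refine ⟨?_, ih (s + 1), ?_⟩
    · have hall : ∀ p ∈ galRowC s r, p.1 = s := galRowC_fst s r
      exact List.Pairwise.imp_of_mem
        (fun hp hq _ => by rw [hall _ hp, hall _ hq])
        (List.pairwise_of_forall (fun _ _ => trivial))
    · intro p hp q hq
      rw [galRowC_fst s r p hp]
      linarith [galC_fst_ge t (s + 1) q hq]

theorem galC_mem_row (rs : List (List Char)) :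
    ∀ s : Int, ∀ p ∈ galC s rs, ∃ row ∈ rs, ∃ k : Nat, ∃ h : k < row.length,
      row[k] = '#' ∧ p.2 = (k : Int) := by
  induction rs with
  | nil => intro s p hp; simp [galC] at hp
  | cons r t ih =>
    intro s p hp
    rcases List.mem_append.mp hp with h | h
    · rcases List.mem_map.mp h with ⟨yc, hyc, rfl⟩
      have hycm := List.mem_filter.mp hyc
      rcases (PySem.List.mem_enumerate_iff _ _ _).mp hycm.1 with ⟨k, hk, rfl⟩
      refine ⟨r, List.mem_cons_self, k, hk, ?_, by simp⟩
      simpa using of_decide_eq_true hycm.2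
    · rcases ih (s + 1) p h with ⟨row, hrow, k, hk, h1, h2⟩
      exact ⟨row, List.mem_cons_of_mem _ hrow, k, hk, h1, h2⟩

theorem galC_col_not_empty (rows : List (List Char)) :
    ∀ p ∈ galC 0 rows, p.2 ∉ pvEC rows := by
  intro p hp hmem
  rcases galC_mem_row rows 0 p hp with ⟨row, hrow, k, hk, hhash, hk2⟩
  have hfil := List.mem_filter.mp hmem
  have hall := List.all_eq_true.mp hfil.2 row hrow
  rw [hk2, PySem.List.pyGetD_natCast] at hall
  simp [List.getD_eq_getElem?_getD, hk, hhash] at hall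

theorem pvInd_nonneg (c : Char) : 0 ≤ pvInd c := by unfold pvInd; split <;> simp

theorem pvInd_eq_zero_iff (c : Char) : pvInd c = 0 ↔ c ≠ '#' := by
  unfold pvInd; split <;> simp [*]

theorem sum_map_pvInd_zero_iff {α : Type} (f : α → Char) (l : List α) :
    ((l.map (fun x => pvInd (f x))).sum = 0) ↔ ∀ x ∈ l, f x ≠ '#' := by
  induction l with
  | nil => simp
  | cons a t ih =>
    have h1 : 0 ≤ pvInd (f a) := pvInd_nonneg _
    have h2 : 0 ≤ (t.map (fun x => pvInd (f x))).sum := by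
      apply List.sum_nonneg
      intro x hx
      rcases List.mem_map.mp hx with ⟨y, _, rfl⟩
      exact pvInd_nonneg _
    simp only [List.map_cons, List.sum_cons, List.mem_cons]
    constructor
    · intro hz
      have ha : pvInd (f a) = 0 := by omega
      have ht : (t.map (fun x => pvInd (f x))).sum = 0 := by omega
      intro x hx
      rcases hx with rfl | hx
      · exact (pvInd_eq_zero_iff _).mp ha
      · exact ih.mp ht x hx
    · intro hall
      have ha : pvInd (f a) = 0 := (pvInd_eq_zero_iff _).mpr (hall a (Or.inl rfl))
      have ht := ih.mpr (fun x hx => hall x (Or.inr hx))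
      omega

theorem rowsum_zero_iff (l : List Char) : ((l.map pvInd).sum = 0) ↔ ('#' ∉ l) := by
  have := sum_map_pvInd_zero_iff (fun c => c) l

  constructor
  · intro h hm; exact (this.mp h) '#' hm rfl
  · intro h; exact this.mpr (fun x hx hc => h (hc ▸ hx))

theorem a_e0_eq (input_list : List String) :
    (get_empties (make_int_board input_list)).1 = pvER (pvRows input_list) := by
  unfold get_empties
  rw [make_int_board_eq]
  simp only []
  rw [PySem.List.foldl_append_ite (p := fun ir : Int × List Int => ir.2.sum = 0)
    (f := fun ir => ir.1), enumerate_map, List.filter_map, List.map_map]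
  rw [pvER, List.nil_append]
  congr 1
  apply List.filter_congr
  intro p _
  show decide ((List.map pvInd p.2).sum = 0) = decide (¬ '#' ∈ p.2)
  rw [decide_eq_decide]
  exact rowsum_zero_iff p.2

theorem foldl_min_proj_le {α : Type} (f : α → Nat) (l : List α) :
    ∀ a : Nat, l.foldl (fun m x => min m (f x)) a ≤ a
      ∧ ∀ x ∈ l, l.foldl (fun m x => min m (f x)) a ≤ f x := by
  induction l with
  | nil => intro a; simp
  | cons b t ih =>
    intro a
    rcases ih (min a (f b)) with ⟨h1, h2⟩
    refine ⟨le_trans h1 (by omega), ?_⟩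
    intro x hx
    rcases List.mem_cons.mp hx with rfl | hx
    · exact le_trans h1 (by omega)
    · exact h2 x hx

theorem pvMinLen_le {α : Type} (rows : List (List α)) :
    ∀ r ∈ rows, pvMinLen rows ≤ r.length := by
  cases rows with
  | nil => simp
  | cons r rs =>
    intro x hx
    rcases List.mem_cons.mp hx with rfl | hx
    · exact (foldl_min_proj_le List.length rs x.length).1
    · exact (foldl_min_proj_le List.length rs r.length).2 x hx

theorem pvMinLen_board (rows : List (List Char)) :
    pvMinLen (rows.map (fun r => r.map pvInd)) = pvMinLen rows := by
  cases rows with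
  | nil => rfl
  | cons r rs => simp [pvMinLen, List.foldl_map]

theorem a_e1_eq (input_list : List String) :
    (get_empties (make_int_board input_list)).2 = pvEC (pvRows input_list) := by
  unfold get_empties
  rw [make_int_board_eq]
  set rows := pvRows input_list with hrows
  simp only []
  rw [PySem.List.foldl_append_ite (p := fun ic : Int × List Int => ic.2.sum = 0)
    (f := fun ic => ic.1)]
  rw [pyZipT, pvMinLen_board, enumerate_map, enumerate_pyRange_zero, List.map_map,
      List.filter_map, List.map_map, pvEC, List.nil_append]
  have hmapid : ∀ (l : List Int) (p : Int → Bool),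
      (l.filter p).map ((fun ic : Int × List Int => ic.1) ∘
        ((fun pr : Int × Int => (pr.1, ((rows.map (fun r => r.map pvInd)).map
            (fun r => PySem.List.pyGetD r pr.2 0) : List Int))) ∘ (fun j : Int => (j, j))))
      = l.filter p := by
    intro l p
    exact (List.map_congr_left (fun x _ => rfl)).trans (List.map_id _)
  rw [hmapid]
  apply List.filter_congr
  intro j hj
  have hjr := PySem.List.mem_pyRange_one.mp hj
  simp only [Function.comp, List.map_map]
  have hcol : List.map ((fun r : List Int => PySem.List.pyGetD r j 0) ∘
        fun r : List Char => r.map pvInd) rows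
      = rows.map (fun r => pvInd (PySem.List.pyGetD r j ' ')) := by
    apply List.map_congr_left
    intro r hr
    have hlen : j.toNat < r.length := by
      have := pvMinLen_le rows r hr
      omega
    simp only [Function.comp]
    rw [PySem.List.pyGetD_of_nonneg _ _ hjr.1, PySem.List.pyGetD_of_nonneg _ _ hjr.1]
    rw [List.getD_eq_getElem?_getD, List.getD_eq_getElem?_getD]
    simp [hlen]
  rw [hcol]
  rw [Bool.eq_iff_iff]
  simp only [decide_eq_true_eq, List.all_eq_true, decide_eq_true_eq]
  exact sum_map_pvInd_zero_iff (fun r => PySem.List.pyGetD r j ' ') rows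

theorem b_empty_rows_eq (rows : List (List Char)) :
    ((PySem.List.enumerate rows).foldl
      (fun acc ir => if '#' ∈ ir.2 then acc else acc ++ [ir.1]) []) = pvER rows := by
  have hfn : (fun (acc : List Int) (ir : Int × List Char) =>
        if '#' ∈ ir.2 then acc else acc ++ [ir.1])
      = (fun acc ir => if ¬ '#' ∈ ir.2 then acc ++ [ir.1] else acc) := by
    funext acc ir; by_cases h : '#' ∈ ir.2 <;> simp [h]
  rw [hfn, PySem.List.foldl_append_ite (p := fun ir : Int × List Char => ¬ '#' ∈ ir.2)
    (f := fun ir => ir.1)]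
  rfl

theorem b_empty_cols_eq (rows : List (List Char)) :
    ((PySem.List.pyRange 0 (pvMinLen rows : Int) 1).foldl
      (fun acc j => if rows.all (fun row => PySem.List.pyGetD row j ' ' ≠ '#')
                    then acc ++ [j] else acc) []) = pvEC rows := by
  rw [PySem.List.foldl_append_if_eq_filter
    (p := fun j => rows.all (fun row => PySem.List.pyGetD row j ' ' ≠ '#'))]
  rfl

theorem countP_split (E : List Int) (a b : Int) (hab : a ≤ b) :
    E.countP (fun e => decide (a ≤ e ∧ e < b)) + E.countP (fun e => decide (e < a))
      = E.countP (fun e => decide (e < b)) := by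
  induction E with
  | nil => simp
  | cons x t ih => by_cases hx : x < a <;> by_cases hy : x < b <;>
      simp_all <;> omega

theorem countP_shift (E : List Int) (y : Int) (hy : y ∉ E) :
    E.countP (fun e => decide (e < y + 1)) = E.countP (fun e => decide (e < y)) := by
  induction E with
  | nil => simp
  | cons x t ih =>
    simp only [List.mem_cons, not_or] at hy
    have hd : (decide (x < y + 1)) = (decide (x < y)) := by
      have hne : ¬ y = x := hy.1
      simp only [decide_eq_decide]; omega
    simp only [List.countP_cons, ih hy.2, hd]

theorem cnt_between (E : List Int) (a b : Int) (hab : a ≤ b) :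
    ((E.countP (fun e => decide (a ≤ e ∧ e < b)) : Int)) = pvCnt E b - pvCnt E a := by
  have h := countP_split E a b hab
  unfold pvCnt
  omega

theorem filter_range_count (E : List Int) (a b extra : Int) (hab : a ≤ b) :
    ((E.filter (fun i => decide (i ∈ PySem.List.pyRange a b 1))).map
      (fun _ => extra)).sum = extra * (pvCnt E b - pvCnt E a) := by
  rw [List.filter_congr (q := fun e => decide (a ≤ e ∧ e < b))
      (fun x _ => by rw [decide_eq_decide]; exact PySem.List.mem_pyRange_one)]
  rw [PySem.List.sum_map_const_int, ← List.countP_eq_length_filter, cnt_between E a b hab]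
  ring

theorem filter_range_count_desc (E : List Int) (a b extra : Int) (hab : b < a)
    (ha : a ∉ E) (hb : b ∉ E) :
    ((E.filter (fun i => decide (i ∈ PySem.List.pyRange a b (-1)))).map
      (fun _ => extra)).sum = extra * (pvCnt E a - pvCnt E b) := by
  rw [List.filter_congr (q := fun e => decide (b + 1 ≤ e ∧ e < a + 1))
      (fun x _ => by rw [decide_eq_decide]
                     rw [PySem.List.mem_pyRange_neg_one]; omega)]
  rw [PySem.List.sum_map_const_int, ← List.countP_eq_length_filter,
      cnt_between E (b + 1) (a + 1) (by omega)]
  have hsa := countP_shift E a ha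
  have hsb := countP_shift E b hb
  unfold pvCnt
  rw [hsa, hsb]
  ring

-- the per-pair value, written with the common expansion function pvF
theorem pair_c (ER EC : List Int) (extra : Int) (p q : Int × Int)
    (hx : p.1 ≤ q.1) (hp : p.2 ∉ EC) (hq : q.2 ∉ EC) :
    pvC (ER, EC) extra p q
      = (pvF ER extra q.1 - pvF ER extra p.1)
        + (pvF EC extra (max p.2 q.2) - pvF EC extra (min p.2 q.2)) := by
  unfold pvC add_expanded_space
  simp only [if_neg (not_lt.mpr hx)]
  rw [filter_range_count ER p.1 q.1 extra hx]
  rw [abs_of_nonneg (a := q.1 - p.1) (by omega)]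
  by_cases hy : p.2 ≤ q.2
  · simp only [if_neg (not_lt.mpr hy)]
    rw [filter_range_count EC p.2 q.2 extra hy]
    rw [abs_of_nonneg (a := q.2 - p.2) (by omega)]
    rw [max_eq_right hy, min_eq_left hy]
    unfold pvF
    ring
  · replace hy : q.2 < p.2 := by omega
    simp only [if_pos hy]
    rw [filter_range_count_desc EC p.2 q.2 extra hy hp hq]
    rw [abs_of_nonpos (a := q.2 - p.2) (by omega)]
    rw [max_eq_left (le_of_lt hy), min_eq_right (le_of_lt hy)]
    unfold pvF
    ring

theorem range_pairSum {α : Type} (c : α → α → Int) (d : α) (G : List α) :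
    ((PySem.List.pyRange 0 (G.length : Int) 1).map
      (fun i => ((G.drop ((i + 1).toNat)).map (c (PySem.List.pyGetD G i d))).sum)).sum
    = pairSum c G := by
  induction G using List.reverseRecOn with
  | nil => simp [pairSum, PySem.List.pyRange_one_eq_nil]
  | append_singleton l a ih =>
    have hlen : ((l ++ [a]).length : Int) = (l.length : Int) + 1 := by simp
    rw [hlen, PySem.List.pyRange_one_succ_right (by positivity), List.map_append,
        List.sum_append]
    have hlast : ([( (l.length : Int) )].map
        (fun i => (((l ++ [a]).drop ((i + 1).toNat)).map
          (c (PySem.List.pyGetD (l ++ [a]) i d))).sum)).sum = 0 := by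
      have hd : ((l.length : Int) + 1).toNat = l.length + 1 := by omega
      simp [hd]
    rw [hlast, add_zero]
    have hterm : (PySem.List.pyRange 0 (l.length : Int) 1).map
        (fun i => (((l ++ [a]).drop ((i + 1).toNat)).map
          (c (PySem.List.pyGetD (l ++ [a]) i d))).sum)
      = (PySem.List.pyRange 0 (l.length : Int) 1).map
        (fun i => ((l.drop ((i + 1).toNat)).map (c (PySem.List.pyGetD l i d))).sum
          + c (PySem.List.pyGetD l i d) a) := by
      apply List.map_congr_left
      intro i hi
      have hir := PySem.List.mem_pyRange_one.mp hi
      have hle : (i + 1).toNat ≤ l.length := by omega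
      have hlt : i.toNat < l.length := by omega
      rw [List.drop_append_of_le_length hle]
      have hget : PySem.List.pyGetD (l ++ [a]) i d = PySem.List.pyGetD l i d := by
        rw [PySem.List.pyGetD_of_nonneg _ _ hir.1, PySem.List.pyGetD_of_nonneg _ _ hir.1]
        rw [List.getD_eq_getElem?_getD, List.getD_eq_getElem?_getD,
            List.getElem?_append_left hlt]
      rw [hget, List.map_append, List.sum_append]
      simp
    rw [hterm, PySem.List.sum_map_add_int, ih]
    have hsec : ((PySem.List.pyRange 0 (l.length : Int) 1).map
        (fun i => c (PySem.List.pyGetD l i d) a)).sum = (l.map (fun x => c x a)).sum := by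
      have hcomp : (PySem.List.pyRange 0 (l.length : Int) 1).map
            (fun i => c (PySem.List.pyGetD l i d) a)
          = ((PySem.List.pyRange 0 (l.length : Int) 1).map
            (fun j => PySem.List.pyGetD l j d)).map (fun x => c x a) := by
        rw [List.map_map]
        rfl
      rw [hcomp, PySem.List.map_pyGetD_pyRange_zero' l d]
    rw [hsec, pairSum_append_singleton]

-- A's double loop is the pairSum of pvC over the galaxy list
set_option maxHeartbeats 1600000 in
theorem double_loop {α : Type} (c1 c2 c3 : α → α → Int) (d : α) (G : List α) :
    (PySem.List.enumerate G).foldl (fun answer iu =>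
      (PySem.List.pyRange (iu.1 + 1) (G.length : Int) 1).foldl
        (fun ans j => ans + c1 (PySem.List.pyGetD G iu.1 d) (PySem.List.pyGetD G j d)
            + c2 (PySem.List.pyGetD G iu.1 d) (PySem.List.pyGetD G j d)
            + c3 (PySem.List.pyGetD G iu.1 d) (PySem.List.pyGetD G j d)) answer) 0
    = pairSum (fun p q => c1 p q + c2 p q + c3 p q) G := by
  set c : α → α → Int := fun p q => c1 p q + c2 p q + c3 p q with hc
  have hcong : ∀ iu ∈ PySem.List.enumerate G, ∀ answer : Int,
      (PySem.List.pyRange (iu.1 + 1) (G.length : Int) 1).foldl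
        (fun ans j => ans + c1 (PySem.List.pyGetD G iu.1 d) (PySem.List.pyGetD G j d)
            + c2 (PySem.List.pyGetD G iu.1 d) (PySem.List.pyGetD G j d)
            + c3 (PySem.List.pyGetD G iu.1 d) (PySem.List.pyGetD G j d)) answer
      = answer + ((G.drop ((iu.1 + 1).toNat)).map (c (PySem.List.pyGetD G iu.1 d))).sum := by
    intro iu hiu answer
    rcases (PySem.List.mem_enumerate_iff _ _ _).mp hiu with ⟨k, hk, rfl⟩
    have h0 : (0 : Int) ≤ (0 : Int) + (k : Int) + 1 := by positivity
    rw [PySem.List.foldl_pyRange_pyGetD' G d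
      (fun ans x => ans + c1 (PySem.List.pyGetD G ((0 : Int) + (k : Int)) d) x
          + c2 (PySem.List.pyGetD G ((0 : Int) + (k : Int)) d) x
          + c3 (PySem.List.pyGetD G ((0 : Int) + (k : Int)) d) x)
      answer h0]
    rw [PySem.List.foldl_congr_mem' _ _
      (fun ans x => ans + c (PySem.List.pyGetD G ((0 : Int) + (k : Int)) d) x) answer
      (fun x _ acc => by rw [hc]; ring)]
    rw [PySem.List.foldl_add]
  refine Eq.trans (PySem.List.foldl_congr_mem' _ _
    (fun answer iu => answer
      + ((G.drop ((iu.1 + 1).toNat)).map (c (PySem.List.pyGetD G iu.1 d))).sum) 0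
    (fun iu hiu answer => hcong iu hiu answer)) ?_
  refine Eq.trans (List.foldl_map (f := fun iu : Int × α => iu.1)
    (g := fun answer i => answer
      + ((G.drop ((i + 1).toNat)).map (c (PySem.List.pyGetD G i d))).sum)
    (l := PySem.List.enumerate G) (init := 0)).symm ?_
  rw [PySem.List.map_fst_enumerate, zero_add]
  rw [PySem.List.foldl_add (PySem.List.pyRange 0 (G.length : Int) 1)
    (fun i => ((G.drop ((i + 1).toNat)).map (c (PySem.List.pyGetD G i d))).sum) 0]
  rw [zero_add]
  exact range_pairSum c d G

set_option maxHeartbeats 1600000 in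
theorem solve_eq_pairSum (input_list : List String) (extra : Int) :
    solve input_list extra
      = pairSum (pvC (get_empties (make_int_board input_list)) extra)
          (galC 0 (pvRows input_list)) := by
  simp only [solve]
  rw [find_galaxies_eq]
  exact double_loop (fun p q => |q.1 - p.1|) (fun p q => |q.2 - p.2|)
    (fun p q => add_expanded_space p q (get_empties (make_int_board input_list)) extra)
    ((0 : Int), (0 : Int)) (galC 0 (pvRows input_list))

theorem cnt1 (E : List Int) (v : Int) :
    ((E.filter (fun e => decide (e < v))).map (fun _ => (1 : Int))).sum = pvCnt E v := by
  rw [PySem.List.sum_map_const_int, ← List.countP_eq_length_filter]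
  unfold pvCnt
  ring

theorem sum_map_const_sub {α : Type} (c : Int) (f : α → Int) (l : List α) :
    (l.map (fun x => c - f x)).sum = (l.length : Int) * c - (l.map f).sum := by
  induction l with
  | nil => simp
  | cons b t ih =>
    simp only [List.map_cons, List.sum_cons, List.length_cons, ih]
    push_cast
    ring

theorem axis_total_aux (E : List Int) (extra : Int) (vals : List Int) :
    (PySem.List.enumerate vals).foldl (fun st kv =>
      let w := kv.2 + extra *
        ((E.filter (fun e => e < kv.2)).map (fun _ => (1 : Int))).sum
      (st.1 + kv.1 * w - st.2, st.2 + w)) ((0 : Int), (0 : Int))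
    = (pairSum (fun a b => pvF E extra b - pvF E extra a) vals,
       (vals.map (pvF E extra)).sum) := by
  induction vals using List.reverseRecOn with
  | nil => simp [pairSum]
  | append_singleton l a ih =>
    rw [PySem.List.enumerate_append, List.foldl_append, ih]
    simp only [PySem.List.enumerate_cons, PySem.List.enumerate_nil, List.foldl_cons,
      List.foldl_nil]
    have hw : a + extra * ((E.filter (fun e => e < a)).map (fun _ => (1 : Int))).sum
        = pvF E extra a := by
      rw [cnt1]; rfl
    simp only [hw]
    rw [Prod.mk.injEq]
    constructor
    · rw [pairSum_append_singleton]
      have : (l.map (fun x => pvF E extra a - pvF E extra x)).sum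
          = (l.length : Int) * pvF E extra a - (l.map (pvF E extra)).sum :=
        sum_map_const_sub _ _ _
      rw [this]
      ring
    · simp

theorem axis_total_eq (vals E : List Int) (extra : Int) :
    axis_total vals E extra = pairSum (fun a b => pvF E extra b - pvF E extra a) vals := by
  unfold axis_total
  rw [axis_total_aux]

-- the whole reduction, for a fixed char board rs
theorem main_eq (rs : List (List Char)) (extra : Int) :
    pairSum (pvC (pvER rs, pvEC rs) extra) (galC 0 rs)
      = pairSum (fun a b => pvF (pvER rs) extra b - pvF (pvER rs) extra a)
          ((galC 0 rs).map (·.1))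
        + pairSum (fun a b => pvF (pvEC rs) extra b - pvF (pvEC rs) extra a)
          (PySem.List.sorted ((galC 0 rs).map (·.2)) (fun v => v) false) := by
  set G := galC 0 rs with hG
  have hPair : G.Pairwise (fun p q => p.1 ≤ q.1 ∧ p.2 ∉ pvEC rs ∧ q.2 ∉ pvEC rs) :=
    List.Pairwise.imp_of_mem
      (fun ha hb h => ⟨h, galC_col_not_empty rs _ ha, galC_col_not_empty rs _ hb⟩)
      (galC_pairwise rs 0)
  have step1 : pairSum (pvC (pvER rs, pvEC rs) extra) G
      = pairSum (fun p q =>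
          (pvF (pvER rs) extra q.1 - pvF (pvER rs) extra p.1)
          + (pvF (pvEC rs) extra (max p.2 q.2) - pvF (pvEC rs) extra (min p.2 q.2))) G :=
    pairSum_congr hPair
      (fun p q h => pair_c (pvER rs) (pvEC rs) extra p q h.1 h.2.1 h.2.2)
  rw [step1, pairSum_add]
  congr 1
  · exact (pairSum_map (fun a b => pvF (pvER rs) extra b - pvF (pvER rs) extra a)
      (·.1) G).symm
  · have hs : ∀ a b : Int,
        pvF (pvEC rs) extra (max a b) - pvF (pvEC rs) extra (min a b)
        = pvF (pvEC rs) extra (max b a) - pvF (pvEC rs) extra (min b a) := by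
      intro a b; rw [max_comm, min_comm]
    have y1 : pairSum (fun a b =>
          pvF (pvEC rs) extra (max a b) - pvF (pvEC rs) extra (min a b)) (G.map (·.2))
        = pairSum (fun p q =>
          pvF (pvEC rs) extra (max p.2 q.2) - pvF (pvEC rs) extra (min p.2 q.2)) G :=
      pairSum_map _ (·.2) G
    have y2 : pairSum (fun a b =>
          pvF (pvEC rs) extra (max a b) - pvF (pvEC rs) extra (min a b))
          (PySem.List.sorted (G.map (·.2)) (fun v => v) false)
        = pairSum (fun a b =>
          pvF (pvEC rs) extra (max a b) - pvF (pvEC rs) extra (min a b)) (G.map (·.2)) :=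
      pairSum_perm hs (PySem.List.sorted_perm _ _ _)
    have y3 : pairSum (fun a b =>
          pvF (pvEC rs) extra (max a b) - pvF (pvEC rs) extra (min a b))
          (PySem.List.sorted (G.map (·.2)) (fun v => v) false)
        = pairSum (fun a b => pvF (pvEC rs) extra b - pvF (pvEC rs) extra a)
          (PySem.List.sorted (G.map (·.2)) (fun v => v) false) :=
      pairSum_congr (PySem.List.sorted_pairwise (G.map (·.2)) (fun v => v))
        (fun a b hab => by
          simp only [max_eq_right hab, min_eq_left hab])
    rw [← y3, y2, y1]

-- ===== VERDICT (by name: the statement is the Claim_ definition above) =====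
theorem solve_spec : Claim_equal_solve := by
  unfold Claim_equal_solve
  intro input_list how_many_extra _
  unfold Spec_solve
  have hE : get_empties (make_int_board input_list)
      = (pvER (pvRows input_list), pvEC (pvRows input_list)) :=
    Prod.ext (a_e0_eq input_list) (a_e1_eq input_list)
  rw [solve_eq_pairSum, hE]
  simp only [solve_alt]
  rw [b_scan_eq]
  dsimp only
  rw [b_empty_rows_eq, b_empty_cols_eq, axis_total_eq, axis_total_eq]
  simp only [pvRows]
  exact main_eq (input_list.map (fun s => s.toList)) how_many_extra
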